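-- pv_equiv track=rewrite | github.com/waifuai/ai-benchmarks | benchmarks/maze/strategic_evaluator_fixed.py | count_adjacent_traps
-- ===== SOURCE A (Python) =====
-- from typing import List, Tuple, Dict, Set, Optional, FrozenSet
--
-- def count_adjacent_traps(grid: List[str], valid_path: Set[Tuple[int, int]]) -> int:
--     """Count traps adjacent to the valid path (enhanced for strategic placement)."""
--     adjacent_traps = 0
--
--     for i, j in valid_path:
--         # Check all four adjacent positions
--         for di, dj in [(-1, 0), (1, 0), (0, -1), (0, 1)]:
--             ni, nj = i + di, j + dj
--
--             # Check bounds and if it's a trap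
--             if (0 <= ni < len(grid) and 0 <= nj < len(grid[ni]) and
--                 grid[ni][nj] == 'T'):
--                 adjacent_traps += 1
--
--     return adjacent_traps
-- ===== SOURCE B (Python) =====
-- def count_adjacent_traps(grid, valid_path):
--     """Count traps adjacent to the valid path by scanning the grid for traps
--     and summing, for each trap, the path-multiplicity of its four neighbours."""
--     cnt = {}
--     for p in valid_path:
--         cnt[p] = cnt.get(p, 0) + 1
--     total = 0
--     for ti, row in enumerate(grid):
--         for tj, ch in enumerate(row):
--             if ch == 'T':
--                 for di, dj in ((-1, 0), (1, 0), (0, -1), (0, 1)):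
--                     total += cnt.get((ti + di, tj + dj), 0)
--     return total
-- ===== Notes on version B (the rewrite author's own statement) =====
-- stated objective: alternative
-- what changed: A iterates over the path and probes the grid for trap neighbours; B builds a multiplicity counter of the path once and scans the grid, adding the path-counts of each trap cell's four neighbours, counting the same (path cell, adjacent trap) pairs.
import Mathlib
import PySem

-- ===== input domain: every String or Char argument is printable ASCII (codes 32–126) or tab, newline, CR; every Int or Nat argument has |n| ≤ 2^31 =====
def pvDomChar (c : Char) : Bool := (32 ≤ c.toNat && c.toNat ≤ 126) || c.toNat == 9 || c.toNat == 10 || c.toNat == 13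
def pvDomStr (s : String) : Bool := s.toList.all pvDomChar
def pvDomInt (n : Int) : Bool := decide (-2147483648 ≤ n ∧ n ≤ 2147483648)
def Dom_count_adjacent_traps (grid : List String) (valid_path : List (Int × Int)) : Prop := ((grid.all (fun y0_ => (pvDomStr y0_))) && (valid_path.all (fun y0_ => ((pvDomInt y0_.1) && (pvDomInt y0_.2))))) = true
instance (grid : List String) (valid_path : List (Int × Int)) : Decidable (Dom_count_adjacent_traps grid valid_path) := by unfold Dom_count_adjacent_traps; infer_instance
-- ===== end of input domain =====

-- B scans the grid for traps and sums path-multiplicities of their neighbours, instead of probing the grid from each path cell (alternative decomposition, same cost).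

-- ===== PORT A =====
def count_adjacent_traps (grid : List String) (valid_path : List (Int × Int)) : Int :=
  valid_path.foldl (fun acc p =>
    ([((-1 : Int), (0 : Int)), (1, 0), (0, -1), (0, 1)]).foldl (fun acc2 d =>
      let ni := p.1 + d.1
      let nj := p.2 + d.2
      if 0 ≤ ni ∧ ni < (grid.length : Int) then
        match PySem.List.pyGet? grid ni with
        | some row =>
          if 0 ≤ nj ∧ nj < PySem.Str.len row then
            if PySem.Str.pyGet? row nj = some 'T' then acc2 + 1 else acc2
          else acc2
        | none => acc2
      else acc2) acc) 0

-- ===== PORT B =====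
def count_adjacent_traps_alt (grid : List String) (valid_path : List (Int × Int)) : Int :=
  let cnt : PySem.Dict (Int × Int) Int :=
    valid_path.foldl (fun d p => d.insert p (d.getD p 0 + 1)) PySem.Dict.empty
  (PySem.List.enumerate grid).foldl (fun total pr =>
    (PySem.List.enumerate pr.2.toList).foldl (fun total2 pc =>
      if pc.2 = 'T' then
        ([((-1 : Int), (0 : Int)), (1, 0), (0, -1), (0, 1)]).foldl
          (fun t d => t + cnt.getD (pr.1 + d.1, pc.1 + d.2) 0) total2
      else total2) total) 0

-- ===== PRECONDITION & SPEC =====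
def Spec_count_adjacent_traps (grid : List String) (valid_path : List (Int × Int)) (out : Int) : Prop := out = count_adjacent_traps_alt grid valid_path
instance (grid : List String) (valid_path : List (Int × Int)) (out : Int) : Decidable (Spec_count_adjacent_traps grid valid_path out) := by unfold Spec_count_adjacent_traps; infer_instance

-- ===== CLAIM (what is proved, stated in full; the proofs are below) =====
def Claim_equal_count_adjacent_traps : Prop := ∀ (grid : List String) (valid_path : List (Int × Int)), Dom_count_adjacent_traps grid valid_path → Spec_count_adjacent_traps grid valid_path (count_adjacent_traps grid valid_path)

-- ===== LEMMAS AND PROOFS =====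

-- 0/1 indicator of "cell (ni, nj) is in bounds and is a trap", written as A's test
def trap1 (grid : List String) (ni nj : Int) : Int :=
  if 0 ≤ ni ∧ ni < (grid.length : Int) then
    match PySem.List.pyGet? grid ni with
    | some row =>
      if 0 ≤ nj ∧ nj < PySem.Str.len row then
        if PySem.Str.pyGet? row nj = some 'T' then 1 else 0
      else 0
    | none => 0
  else 0

-- A's per-path-cell contribution
def wA (grid : List String) (p : Int × Int) : Int :=
  trap1 grid (p.1 + -1) (p.2 + 0) + trap1 grid (p.1 + 1) (p.2 + 0) +
  trap1 grid (p.1 + 0) (p.2 + -1) + trap1 grid (p.1 + 0) (p.2 + 1)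

-- sum of f over all grid cells (row index, column index, character)
def gridSum (grid : List String) (f : Int → Int → Char → Int) : Int :=
  ((PySem.List.enumerate grid).map (fun pr =>
    ((PySem.List.enumerate pr.2.toList).map (fun pc => f pr.1 pc.1 pc.2)).sum)).sum

lemma stepA_one (grid : List String) (ni nj acc : Int) :
    (if 0 ≤ ni ∧ ni < (grid.length : Int) then
        match PySem.List.pyGet? grid ni with
        | some row =>
          if 0 ≤ nj ∧ nj < PySem.Str.len row then
            if PySem.Str.pyGet? row nj = some 'T' then acc + 1 else acc
          else acc
        | none => acc
      else acc) = acc + trap1 grid ni nj := by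
  unfold trap1
  by_cases h : 0 ≤ ni ∧ ni < (grid.length : Int)
  · rw [if_pos h, if_pos h]
    cases hx : PySem.List.pyGet? grid ni with
    | none => dsimp only; omega
    | some row => dsimp only; split_ifs <;> first | omega | simp_all
  · rw [if_neg h, if_neg h]; omega

lemma A_eq (grid : List String) (vp : List (Int × Int)) :
    count_adjacent_traps grid vp = (vp.map (wA grid)).sum := by
  unfold count_adjacent_traps
  rw [PySem.List.foldl_congr_mem _ _ (fun acc p => acc + wA grid p) 0
      (by intro acc p _
          simp only [List.foldl]
          rw [stepA_one, stepA_one, stepA_one, stepA_one]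
          unfold wA; ring)]
  rw [PySem.List.foldl_add]
  ring

lemma dirs_fold (vp : List (Int × Int)) (i j t : Int) :
    ([((-1 : Int), (0 : Int)), (1, 0), (0, -1), (0, 1)]).foldl
      (fun t d => t + (vp.foldl (fun d p => d.insert p (d.getD p 0 + 1)) PySem.Dict.empty).getD (i + d.1, j + d.2) 0) t
    = t + ((vp.count (i + -1, j + 0) : Int) + (vp.count (i + 1, j + 0) : Int) +
           (vp.count (i + 0, j + -1) : Int) + (vp.count (i + 0, j + 1) : Int)) := by
  dsimp only [List.foldl]
  rw [PySem.Dict.getD_foldl_insert_add_one, PySem.Dict.getD_foldl_insert_add_one,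
      PySem.Dict.getD_foldl_insert_add_one, PySem.Dict.getD_foldl_insert_add_one]
  rw [PySem.Dict.getD_empty, PySem.Dict.getD_empty, PySem.Dict.getD_empty, PySem.Dict.getD_empty]
  ring

lemma B_eq (grid : List String) (vp : List (Int × Int)) :
    count_adjacent_traps_alt grid vp =
      gridSum grid (fun i j ch => if ch = 'T' then
        (vp.count (i + -1, j + 0) : Int) + (vp.count (i + 1, j + 0) : Int) +
        (vp.count (i + 0, j + -1) : Int) + (vp.count (i + 0, j + 1) : Int) else 0) := by
  unfold count_adjacent_traps_alt
  dsimp only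
  rw [PySem.List.foldl_congr_mem _ _ (fun total pr =>
        total + ((PySem.List.enumerate pr.2.toList).map (fun pc =>
          if pc.2 = 'T' then
            (vp.count (pr.1 + -1, pc.1 + 0) : Int) + (vp.count (pr.1 + 1, pc.1 + 0) : Int) +
            (vp.count (pr.1 + 0, pc.1 + -1) : Int) + (vp.count (pr.1 + 0, pc.1 + 1) : Int)
          else 0)).sum) 0
      (by intro total pr _
          dsimp only
          rw [PySem.List.foldl_congr_mem _ _ (fun total2 pc =>
                total2 + (if pc.2 = 'T' then
                  (vp.count (pr.1 + -1, pc.1 + 0) : Int) + (vp.count (pr.1 + 1, pc.1 + 0) : Int) +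
                  (vp.count (pr.1 + 0, pc.1 + -1) : Int) + (vp.count (pr.1 + 0, pc.1 + 1) : Int)
                else 0)) total
              (by intro total2 pc _
                  dsimp only
                  by_cases hT : pc.2 = 'T'
                  · rw [if_pos hT, if_pos hT, dirs_fold]
                  · rw [if_neg hT, if_neg hT]; ring)]
          exact PySem.List.foldl_add _ _ _)]
  rw [PySem.List.foldl_add]
  unfold gridSum
  ring

lemma gridSum_congr (grid : List String) (f g : Int → Int → Char → Int)
    (h : ∀ i j c, f i j c = g i j c) : gridSum grid f = gridSum grid g := by
  have : f = g := by funext i j c; exact h i j c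
  rw [this]

lemma gridSum_add (grid : List String) (f g : Int → Int → Char → Int) :
    gridSum grid (fun i j c => f i j c + g i j c) = gridSum grid f + gridSum grid g := by
  unfold gridSum
  rw [show (PySem.List.enumerate grid).map (fun pr =>
        ((PySem.List.enumerate pr.2.toList).map (fun pc => f pr.1 pc.1 pc.2 + g pr.1 pc.1 pc.2)).sum)
      = (PySem.List.enumerate grid).map (fun pr =>
        ((PySem.List.enumerate pr.2.toList).map (fun pc => f pr.1 pc.1 pc.2)).sum +
        ((PySem.List.enumerate pr.2.toList).map (fun pc => g pr.1 pc.1 pc.2)).sum)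
      from List.map_congr_left (fun pr _ => PySem.List.sum_map_add_int _ _ _)]
  exact PySem.List.sum_map_add_int _ _ _

lemma gridSum_zero (grid : List String) : gridSum grid (fun _ _ _ => 0) = 0 := by
  simp [gridSum]

-- row-level delta sum
lemma rowDelta (row : List Char) (s j : Int) :
    ((PySem.List.enumerate row s).map (fun pc => if pc.2 = 'T' then (if pc.1 = j then (1 : Int) else 0) else 0)).sum
      = if 0 ≤ j - s ∧ j - s < (row.length : Int) ∧ row[(j - s).toNat]? = some 'T' then 1 else 0 := by
  induction row generalizing s with
  | nil =>
    rw [if_neg (by rintro ⟨h1, h2, _⟩; simp at h2; omega)]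
    simp [PySem.List.enumerate]
  | cons c cs ih =>
    rw [PySem.List.enumerate_cons]
    simp only [List.map_cons, List.sum_cons]
    rw [ih (s + 1)]
    by_cases hsj : s = j
    · subst hsj
      have h2z : (if 0 ≤ s - (s + 1) ∧ s - (s + 1) < (cs.length : Int) ∧ cs[(s - (s + 1)).toNat]? = some 'T' then (1 : Int) else 0) = 0 := by
        rw [if_neg]; rintro ⟨h1, _, _⟩; omega
      rw [h2z, add_zero]
      have h0 : (s - s).toNat = 0 := by omega
      have hc : (0 ≤ s - s ∧ s - s < ((c :: cs).length : Int) ∧ (c :: cs)[(s - s).toNat]? = some 'T') ↔ c = 'T' := by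
        rw [h0]
        simp only [List.getElem?_cons_zero, List.length_cons, Option.some.injEq]
        constructor
        · rintro ⟨_, _, h⟩; exact h
        · intro h; refine ⟨by omega, by push_cast; omega, h⟩
      simp only [hc]
      split_ifs <;> simp_all
    · have h0 : (if c = 'T' then (if s = j then (1 : Int) else 0) else 0) = 0 := by
        simp [hsj]
      rw [h0, zero_add]
      rcases lt_or_gt_of_ne hsj with hlt | hgt
      · -- s < j... wait hsj : s ≠ j; hlt : s < j
        have hn : (j - s).toNat = (j - (s + 1)).toNat + 1 := by omega
        have hiff : (0 ≤ j - (s + 1) ∧ j - (s + 1) < (cs.length : Int) ∧ cs[(j - (s + 1)).toNat]? = some 'T')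
            ↔ (0 ≤ j - s ∧ j - s < ((c :: cs).length : Int) ∧ (c :: cs)[(j - s).toNat]? = some 'T') := by
          rw [hn]
          simp only [List.getElem?_cons_succ, List.length_cons]
          constructor <;> rintro ⟨h1, h2, h3⟩ <;> exact ⟨by omega, by push_cast; push_cast at h2; omega, h3⟩
        simp only [hiff]
      · -- j < s
        rw [if_neg (by rintro ⟨h1, _, _⟩; omega), if_neg (by rintro ⟨h1, _, _⟩; omega)]

lemma gridDeltaAux (rows : List String) (s : Int) (q : Int × Int) :
    ((PySem.List.enumerate rows s).map (fun pr =>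
      ((PySem.List.enumerate pr.2.toList).map (fun pc =>
        if pc.2 = 'T' then (if (pr.1, pc.1) = q then (1 : Int) else 0) else 0)).sum)).sum
    = if 0 ≤ q.1 - s ∧ q.1 - s < (rows.length : Int) then
        (match rows[(q.1 - s).toNat]? with
         | some r => if 0 ≤ q.2 ∧ q.2 < (r.toList.length : Int) ∧ r.toList[q.2.toNat]? = some 'T' then (1 : Int) else 0
         | none => 0)
      else 0 := by
  induction rows generalizing s with
  | nil =>
    rw [if_neg (by rintro ⟨h1, h2⟩; simp at h2; omega)]
    simp [PySem.List.enumerate]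
  | cons r rs ih =>
    rw [PySem.List.enumerate_cons]
    simp only [List.map_cons, List.sum_cons]
    rw [ih (s + 1)]
    by_cases hsq : s = q.1
    · subst hsq
      have h2z : (if 0 ≤ q.1 - (q.1 + 1) ∧ q.1 - (q.1 + 1) < (rs.length : Int) then
          (match rs[(q.1 - (q.1 + 1)).toNat]? with
           | some r => if 0 ≤ q.2 ∧ q.2 < (r.toList.length : Int) ∧ r.toList[q.2.toNat]? = some 'T' then (1 : Int) else 0
           | none => 0)
        else 0) = 0 := by
        rw [if_neg]; rintro ⟨h1, _⟩; omega
      rw [h2z, add_zero]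
      have hf : (fun (pc : Int × Char) =>
          if pc.2 = 'T' then (if (q.1, pc.1) = q then (1 : Int) else 0) else 0)
          = fun pc => if pc.2 = 'T' then (if pc.1 = q.2 then (1 : Int) else 0) else 0 := by
        funext pc
        simp [Prod.ext_iff]
      rw [hf, rowDelta r.toList 0 q.2]
      have h0 : (q.1 - q.1).toNat = 0 := by omega
      conv_rhs => rw [if_pos (⟨by omega, by simp only [List.length_cons]; push_cast; omega⟩ :
        0 ≤ q.1 - q.1 ∧ q.1 - q.1 < ((r :: rs).length : Int)), h0]
      simp only [List.getElem?_cons_zero, sub_zero]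
    · have h1z : ((PySem.List.enumerate r.toList).map (fun pc =>
          if pc.2 = 'T' then (if (s, pc.1) = q then (1 : Int) else 0) else 0)).sum = 0 := by
        have hf : (fun (pc : Int × Char) =>
            if pc.2 = 'T' then (if (s, pc.1) = q then (1 : Int) else 0) else 0) = fun _ => (0 : Int) := by
          funext pc
          simp [Prod.ext_iff, hsq]
        rw [hf]
        simp
      rw [h1z, zero_add]
      rcases lt_or_gt_of_ne hsq with hlt | hgt
      · have hn : (q.1 - s).toNat = (q.1 - (s + 1)).toNat + 1 := by omega
        have hiff : (0 ≤ q.1 - (s + 1) ∧ q.1 - (s + 1) < (rs.length : Int))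
            ↔ (0 ≤ q.1 - s ∧ q.1 - s < ((r :: rs).length : Int)) := by
          simp only [List.length_cons]
          constructor <;> rintro ⟨h1, h2⟩ <;> exact ⟨by omega, by push_cast; push_cast at h2; omega⟩
        simp only [hn, List.getElem?_cons_succ, hiff]
      · rw [if_neg (by rintro ⟨h1, _⟩; omega), if_neg (by rintro ⟨h1, _⟩; omega)]

lemma gridDelta (grid : List String) (q : Int × Int) :
    gridSum grid (fun i j ch => if ch = 'T' then (if (i, j) = q then (1 : Int) else 0) else 0)
      = trap1 grid q.1 q.2 := by
  unfold gridSum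
  rw [gridDeltaAux grid 0 q]
  unfold trap1
  by_cases h : 0 ≤ q.1 ∧ q.1 < (grid.length : Int)
  · rw [if_pos (⟨by omega, by omega⟩ : 0 ≤ q.1 - 0 ∧ q.1 - 0 < (grid.length : Int)), if_pos h]
    have hget : PySem.List.pyGet? grid q.1 = grid[q.1.toNat]? := by
      have h2 := PySem.List.pyGet?_natCast grid q.1.toNat
      rwa [Int.toNat_of_nonneg h.1] at h2
    rw [sub_zero, hget]
    cases hg : grid[q.1.toNat]? with
    | none => rfl
    | some row =>
      dsimp only
      have hlen : PySem.Str.len row = (row.toList.length : Int) := PySem.Str.len_eq row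
      by_cases h2 : 0 ≤ q.2
      · have hget2 : PySem.Str.pyGet? row q.2 = row.toList[q.2.toNat]? := by
          have h3 := PySem.Str.pyGet?_natCast row q.2.toNat
          rwa [Int.toNat_of_nonneg h2] at h3
        rw [hlen, hget2]
        split_ifs <;> tauto
      · rw [if_neg (by rintro ⟨h3, _⟩; omega), if_neg (by rintro ⟨h3, _⟩; omega)]
  · rw [if_neg (by rintro ⟨h1, h2⟩; exact h ⟨by omega, by omega⟩), if_neg h]

lemma deltaShift (grid : List String) (di dj : Int) (p : Int × Int) :
    gridSum grid (fun i j ch => if ch = 'T' then (if (i + di, j + dj) = p then (1 : Int) else 0) else 0)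
      = trap1 grid (p.1 - di) (p.2 - dj) := by
  have h := gridDelta grid (p.1 - di, p.2 - dj)
  rw [← h]
  apply gridSum_congr
  intro i j c
  have : ((i + di, j + dj) = p) ↔ ((i, j) = (p.1 - di, p.2 - dj)) := by
    simp only [Prod.ext_iff]; constructor <;> (intro ⟨h1, h2⟩; omega)
  simp only [this]

lemma count_cons_int (q p : Int × Int) (vp : List (Int × Int)) :
    ((p :: vp).count q : Int) = (vp.count q : Int) + (if q = p then 1 else 0) := by
  rw [List.count_cons]
  split_ifs with h <;> simp_all

lemma central (grid : List String) (vp : List (Int × Int)) :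
    gridSum grid (fun i j ch => if ch = 'T' then
        (vp.count (i + -1, j + 0) : Int) + (vp.count (i + 1, j + 0) : Int) +
        (vp.count (i + 0, j + -1) : Int) + (vp.count (i + 0, j + 1) : Int) else 0)
      = (vp.map (wA grid)).sum := by
  induction vp with
  | nil =>
    rw [gridSum_congr grid _ (fun _ _ _ => 0) (by intro i j c; simp)]
    simp [gridSum_zero]
  | cons p vp ih =>
    rw [gridSum_congr grid _ (fun i j c =>
        ((((if c = 'T' then
              (vp.count (i + -1, j + 0) : Int) + (vp.count (i + 1, j + 0) : Int) +
              (vp.count (i + 0, j + -1) : Int) + (vp.count (i + 0, j + 1) : Int) else 0)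
          + (if c = 'T' then (if (i + -1, j + 0) = p then (1 : Int) else 0) else 0))
          + (if c = 'T' then (if (i + 1, j + 0) = p then (1 : Int) else 0) else 0))
          + (if c = 'T' then (if (i + 0, j + -1) = p then (1 : Int) else 0) else 0))
          + (if c = 'T' then (if (i + 0, j + 1) = p then (1 : Int) else 0) else 0))
      (by intro i j c
          dsimp only
          rw [count_cons_int, count_cons_int, count_cons_int, count_cons_int]
          split_ifs <;> ring)]
    rw [gridSum_add, gridSum_add, gridSum_add, gridSum_add]
    rw [deltaShift grid (-1) 0 p, deltaShift grid 1 0 p,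
        deltaShift grid 0 (-1) p, deltaShift grid 0 1 p]
    rw [ih]
    simp only [List.map_cons, List.sum_cons]
    unfold wA
    rw [show p.1 - -1 = p.1 + 1 from by ring, show p.1 - 1 = p.1 + -1 from by ring,
        show p.2 - -1 = p.2 + 1 from by ring, show p.2 - 1 = p.2 + -1 from by ring,
        show p.1 - 0 = p.1 + 0 from by ring, show p.2 - 0 = p.2 + 0 from by ring]
    ring

-- ===== VERDICT (by name: the statement is the Claim_ definition above) =====
theorem count_adjacent_traps_spec : Claim_equal_count_adjacent_traps := by
  intro grid vp _
  unfold Spec_count_adjacent_traps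
  rw [A_eq, B_eq, central]
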